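-- pv_equiv track=rewrite | github.com/threatcode/hunter-skill | scripts/migrate_skills.py | _generate_semantic_id
-- ===== SOURCE A (Python) =====
-- def _generate_semantic_id(old_id: str, title: str) -> str:
--     """Generate semantic ID from old ID and title"""
--     # If old ID already has semantic meaning, try to extract it
--     if old_id:
--         parts = old_id.split('-')
--         # Remove hash suffix (usually last part)
--         if len(parts) > 1 and len(parts[-1]) >= 10:
--             semantic_part = '-'.join(parts[:-1])
--             if semantic_part:
--                 return semantic_part.lower().replace('_', '-')
--
--     # Generate from title
--     if title:
--         semantic = title.lower().replace(' ', '-').replace('_', '-')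
--         # Remove special characters
--         semantic = ''.join(c if c.isalnum() or c == '-' else '' for c in semantic)
--         # Remove multiple hyphens
--         while '--' in semantic:
--             semantic = semantic.replace('--', '-')
--         return semantic.strip('-')
--
--     return old_id.lower().replace('_', '-')
-- ===== SOURCE B (Python) =====
-- def _generate_semantic_id(old_id: str, title: str) -> str:
--     """Generate semantic ID from old ID and title"""
--     # Old-id branch kept as in the original: strip a long hash suffix.
--     if old_id:
--         parts = old_id.split('-')
--         if len(parts) > 1 and len(parts[-1]) >= 10:
--             semantic_part = '-'.join(parts[:-1])
--             if semantic_part: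
--                 return semantic_part.lower().replace('_', '-')
--
--     # Title branch: one stateful scan instead of replace/filter/collapse/strip.
--     if title:
--         out = []
--         need_sep = False
--         for c in title.lower():
--             if c.isalnum():
--                 if need_sep and out:
--                     out.append('-')
--                 out.append(c)
--                 need_sep = False
--             elif c in ' _-':
--                 need_sep = True
--             # any other character is dropped without forcing a separator
--         return ''.join(out)
--
--     return old_id.lower().replace('_', '-')
-- ===== Notes on version B (the rewrite author's own statement) =====
-- stated objective: alternative
-- what changed: The title branch's replace/comprehension/while-collapse/strip pipeline (several passes plus a repeated '--'-replacement loop) is replaced by a single stateful scan over title.lower() with an output list and a need_sep flag; the old-id branch and fallback are unchanged.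
import Mathlib
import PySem

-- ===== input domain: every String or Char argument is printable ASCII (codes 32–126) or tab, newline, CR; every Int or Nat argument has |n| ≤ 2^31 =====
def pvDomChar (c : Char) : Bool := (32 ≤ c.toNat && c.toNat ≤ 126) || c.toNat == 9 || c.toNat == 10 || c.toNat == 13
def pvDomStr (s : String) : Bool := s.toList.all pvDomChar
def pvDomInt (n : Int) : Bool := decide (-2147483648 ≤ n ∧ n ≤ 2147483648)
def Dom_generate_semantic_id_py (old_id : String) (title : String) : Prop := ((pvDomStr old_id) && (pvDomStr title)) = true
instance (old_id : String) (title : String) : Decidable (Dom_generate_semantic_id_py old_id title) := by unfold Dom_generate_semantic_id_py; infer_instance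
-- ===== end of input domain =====

-- B replaces the title branch's replace/filter/while-collapse/strip pipeline by one stateful scan; old-id branch and fallback unchanged (objective: alternative).

-- ===== PORT A =====

-- while '--' in semantic: semantic = semantic.replace('--','-')  — hand-ported while loop:
-- fuel bounds the number of iterations; each iteration strictly shortens the string, so
-- fuel = initial length suffices (exact; proved via genA_collapse_eq below).
def genA_collapse : Nat → List Char → List Char
  | 0, s => s
  | fuel + 1, s =>
    if PySem.Chars.isIn ['-', '-'] s then
      genA_collapse fuel (PySem.Chars.replace s ['-', '-'] ['-'])
    else s

-- the part of A after the old-id branch: title branch, then fallback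
def genA_rest (old_id : String) (title : String) : String :=
  let ti := title.toList
  if (!ti.isEmpty) = true then
    -- semantic = title.lower().replace(' ', '-').replace('_', '-')
    let semantic := PySem.Chars.replace (PySem.Chars.replace (PySem.Chars.lower ti) [' '] ['-']) ['_'] ['-']
    -- semantic = ''.join(c if c.isalnum() or c == '-' else '' for c in semantic)
    let semantic2 := PySem.Chars.join [] (semantic.map fun c => if (PySem.Chars.isalnum c || (c == '-')) = true then [c] else [])
    -- while '--' in semantic: … ; return semantic.strip('-')
    String.ofList (PySem.Chars.stripChars (genA_collapse semantic2.length semantic2) ['-'])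
  else
    String.ofList (PySem.Chars.replace (PySem.Chars.lower old_id.toList) ['_'] ['-'])

def generate_semantic_id_py (old_id : String) (title : String) : String :=
  let oi := old_id.toList
  if (!oi.isEmpty) = true then
    let parts := PySem.Chars.splitOn oi ['-']          -- old_id.split('-')
    -- parts from split is always nonempty, so parts[-1] never raises; .getD [] is unreachable
    if 1 < parts.length ∧ 10 ≤ ((PySem.List.pyGet? parts (-1)).getD []).length then
      let semantic_part := PySem.Chars.join ['-'] (PySem.List.slice parts none (some (-1)))   -- '-'.join(parts[:-1])
      if (!semantic_part.isEmpty) = true then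
        String.ofList (PySem.Chars.replace (PySem.Chars.lower semantic_part) ['_'] ['-'])
      else genA_rest old_id title
    else genA_rest old_id title
  else genA_rest old_id title

-- ===== PORT B =====

-- the for-loop over title.lower(): out list, need_sep flag
def genB_scan : List Char → List Char → Bool → List Char
  | [], out, _ => out
  | c :: t, out, need =>
    if PySem.Chars.isalnum c then
      genB_scan t ((if need && !out.isEmpty then out ++ ['-'] else out) ++ [c]) false
    else if [' ', '_', '-'].contains c then            -- c in ' _-'
      genB_scan t out true
    else
      genB_scan t out need

def genB_rest (old_id : String) (title : String) : String :=
  let ti := title.toList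
  if (!ti.isEmpty) = true then
    String.ofList (genB_scan (PySem.Chars.lower ti) [] false)
  else
    String.ofList (PySem.Chars.replace (PySem.Chars.lower old_id.toList) ['_'] ['-'])

def generate_semantic_id_py_alt (old_id : String) (title : String) : String :=
  let oi := old_id.toList
  if (!oi.isEmpty) = true then
    let parts := PySem.Chars.splitOn oi ['-']
    if 1 < parts.length ∧ 10 ≤ ((PySem.List.pyGet? parts (-1)).getD []).length then
      let semantic_part := PySem.Chars.join ['-'] (PySem.List.slice parts none (some (-1)))
      if (!semantic_part.isEmpty) = true then
        String.ofList (PySem.Chars.replace (PySem.Chars.lower semantic_part) ['_'] ['-'])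
      else genB_rest old_id title
    else genB_rest old_id title
  else genB_rest old_id title

-- ===== PRECONDITION & SPEC =====
def Spec_generate_semantic_id_py (old_id : String) (title : String) (out : String) : Prop := out = generate_semantic_id_py_alt old_id title
instance (old_id : String) (title : String) (out : String) : Decidable (Spec_generate_semantic_id_py old_id title out) := by unfold Spec_generate_semantic_id_py; infer_instance

-- ===== CLAIM (what is proved, stated in full; the proofs are below) =====
def Claim_equal_generate_semantic_id_py : Prop := ∀ (old_id : String) (title : String), Dom_generate_semantic_id_py old_id title → Spec_generate_semantic_id_py old_id title (generate_semantic_id_py old_id title)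

-- ===== LEMMAS AND PROOFS =====

theorem replace_single (a b : Char) : ∀ (fuel : Nat) (s acc : List Char), s.length ≤ fuel →
    PySem.Chars.replace.go [a] [b] fuel s acc = acc.reverse ++ s.map (fun c => if c = a then b else c) := by
  intro fuel
  induction fuel with
  | zero => intro s acc h; simp at h; simp [h, PySem.Chars.replace.go]
  | succ n ih =>
    intro s acc h
    cases s with
    | nil => simp [PySem.Chars.replace.go]
    | cons c t =>
      have hlen : t.length ≤ n := by simpa using Nat.le_of_succ_le_succ h
      simp only [PySem.Chars.replace.go]
      have hp : List.isPrefixOf [a] (c :: t) = (a == c) := by simp [List.isPrefixOf]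
      rw [hp]
      by_cases hc : a = c
      · subst hc
        simp only [beq_self_eq_true, if_pos]
        rw [ih _ _ (by simpa using hlen)]
        simp
      · rw [if_neg (by simpa using hc)]
        rw [ih t (c :: acc) hlen]
        simp [Ne.symm hc]

def repDD : List Char → List Char
  | [] => []
  | [c] => [c]
  | c :: d :: t => if c = '-' ∧ d = '-' then c :: repDD t else c :: repDD (d :: t)

def hasDD : List Char → Bool
  | [] => false
  | [_] => false
  | c :: d :: t => if c = '-' ∧ d = '-' then true else hasDD (d :: t)

theorem replace_dd : ∀ (fuel : Nat) (s acc : List Char), s.length ≤ fuel →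
    PySem.Chars.replace.go ['-', '-'] ['-'] fuel s acc = acc.reverse ++ repDD s := by
  intro fuel
  induction fuel with
  | zero => intro s acc h; simp at h; simp [h, PySem.Chars.replace.go, repDD]
  | succ n ih =>
    intro s acc h
    cases s with
    | nil => simp [PySem.Chars.replace.go, repDD]
    | cons c t =>
      cases t with
      | nil =>
        simp only [PySem.Chars.replace.go]
        have hp : List.isPrefixOf ['-','-'] [c] = false := by simp [List.isPrefixOf]
        rw [hp]
        simp only [Bool.false_eq_true, if_neg, not_false_iff]
        rw [ih [] (c :: acc) (by simp)]
        simp [repDD, PySem.Chars.replace.go]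
      | cons d t' =>
        have hlen : (d :: t').length ≤ n := by simpa using Nat.le_of_succ_le_succ h
        simp only [PySem.Chars.replace.go]
        have hp : List.isPrefixOf ['-','-'] (c :: d :: t') = (c == '-' && d == '-') := by
          simp [List.isPrefixOf, Bool.beq_comm]
        rw [hp]
        by_cases hc : c = '-' ∧ d = '-'
        · obtain ⟨h1, h2⟩ := hc; subst h1; subst h2
          simp only [beq_self_eq_true, Bool.and_self, if_pos]
          rw [show List.drop (['-','-'] : List Char).length ('-' :: '-' :: t') = t' by simp]
          rw [ih t' _ (by simp at hlen ⊢; omega)]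
          simp [repDD]
        · rw [if_neg (by simp; intro hh; subst hh; intro hh2; exact hc ⟨rfl, hh2⟩)]
          rw [ih (d :: t') (c :: acc) hlen]
          rw [show repDD (c :: d :: t') = c :: repDD (d :: t') by simp [repDD, hc]]
          simp

theorem hasDD_eq_isIn (s : List Char) : PySem.Chars.isIn ['-', '-'] s = hasDD s := by
  induction s using hasDD.induct with
  | case1 => simp [hasDD, PySem.Chars.isIn_eq_false_iff]
  | case2 c =>
    simp only [hasDD]
    rw [PySem.Chars.isIn_eq_false_iff]
    intro hinf
    have := List.IsInfix.length_le hinf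
    simp at this
  | case3 c d t hc =>
    obtain ⟨h1, h2⟩ := hc; subst h1; subst h2
    simp only [hasDD, and_self, if_pos]
    rw [PySem.Chars.isIn_iff_infix]
    exact ⟨[], t, by simp⟩
  | case4 c d t hc ih =>
    simp only [hasDD]
    rw [if_neg hc, ← ih]
    cases h : PySem.Chars.isIn ['-','-'] (d :: t) with
    | false =>
      rw [PySem.Chars.isIn_eq_false_iff] at h
      rw [PySem.Chars.isIn_eq_false_iff]
      intro hinf
      rcases List.infix_cons_iff.mp hinf with hpre | hinf2
      · rcases List.cons_prefix_cons.mp hpre with ⟨he1, hpre2⟩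
        rcases List.cons_prefix_cons.mp hpre2 with ⟨he2, _⟩
        exact hc ⟨he1.symm, he2.symm⟩
      · exact h hinf2
    | true =>
      rw [PySem.Chars.isIn_iff_infix] at h
      rw [PySem.Chars.isIn_iff_infix]
      exact h.trans ((List.suffix_cons c (d :: t)).isInfix)

def squeeze : List Char → List Char
  | [] => []
  | c :: t => if c = '-' ∧ t.head? = some '-' then squeeze t else c :: squeeze t

theorem repDD_length_le : ∀ (u : List Char), (repDD u).length ≤ u.length := by
  intro u
  induction u using repDD.induct with
  | case1 => simp [repDD]
  | case2 c => simp [repDD]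
  | case3 c d t hc ih =>
    obtain ⟨h1, h2⟩ := hc; subst h1; subst h2
    simp only [repDD, and_self, if_pos, List.length_cons]
    omega
  | case4 c d t hc ih =>
    simp only [repDD, if_neg hc, List.length_cons]
    simp only [List.length_cons] at ih
    omega

theorem repDD_length_lt : ∀ (s : List Char), hasDD s = true → (repDD s).length < s.length := by
  intro s
  induction s using hasDD.induct with
  | case1 => simp [hasDD]
  | case2 c => simp [hasDD]
  | case3 c d t hc =>
    intro _
    obtain ⟨h1, h2⟩ := hc; subst h1; subst h2
    simp only [repDD, and_self, if_pos, List.length_cons]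
    have := repDD_length_le t
    simp
    omega
  | case4 c d t hc ih =>
    intro h
    simp only [hasDD, if_neg hc] at h
    simp only [repDD, if_neg hc, List.length_cons]
    exact Nat.succ_lt_succ (ih h)

theorem squeeze_self : ∀ (s : List Char), hasDD s = false → squeeze s = s := by
  intro s
  induction s using hasDD.induct with
  | case1 => simp [squeeze]
  | case2 c => simp [squeeze]
  | case3 c d t hc => intro h; simp [hasDD, hc] at h
  | case4 c d t hc ih =>
    intro h
    simp only [hasDD, if_neg hc] at h
    have hcond : ¬(c = '-' ∧ (d :: t).head? = some '-') := by
      simpa using hc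
    conv_lhs => rw [squeeze]
    rw [if_neg hcond, ih h]

theorem squeeze_dd (t : List Char) : squeeze ('-' :: '-' :: t) = squeeze ('-' :: t) := by
  simp [squeeze]

theorem squeeze_cons_ne (c : Char) (t : List Char) (h : c ≠ '-') : squeeze (c :: t) = c :: squeeze t := by
  conv_lhs => rw [squeeze]
  rw [if_neg (by simp [h])]

theorem squeeze_dash_cons_ne (c : Char) (t : List Char) (h : c ≠ '-') :
    squeeze ('-' :: c :: t) = '-' :: squeeze (c :: t) := by
  conv_lhs => rw [squeeze]
  rw [if_neg (by simp [h])]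

theorem sq_rep_aux : ∀ (n : Nat) (s : List Char), s.length ≤ n →
    squeeze (repDD s) = squeeze s ∧ squeeze ('-' :: repDD s) = squeeze ('-' :: s) := by
  intro n
  induction n with
  | zero => intro s h; simp at h; simp [h, repDD]
  | succ n ih =>
    intro s hlen
    constructor
    · -- P s
      match s with
      | [] => simp [repDD]
      | [c] => simp [repDD]
      | c :: d :: t =>
        by_cases hc : c = '-' ∧ d = '-'
        · obtain ⟨h1, h2⟩ := hc; subst h1; subst h2
          rw [show repDD ('-' :: '-' :: t) = '-' :: repDD t by simp [repDD]]
          rw [squeeze_dd]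
          exact (ih t (by simp at hlen; omega)).2
        · rw [show repDD (c :: d :: t) = c :: repDD (d :: t) by simp [repDD, hc]]
          by_cases hcd : c = '-'
          · subst hcd
            have hd : d ≠ '-' := by intro h; exact hc ⟨rfl, h⟩
            have := (ih (d :: t) (by simp at hlen ⊢; omega)).2
            exact this
          · rw [squeeze_cons_ne c _ hcd, squeeze_cons_ne c _ hcd]
            have := (ih (d :: t) (by simp at hlen ⊢; omega)).1
            rw [this]
    · -- Q s
      cases s with
      | nil => simp [repDD]
      | cons c t' =>
        by_cases hc : c = '-'
        · subst hc
          cases t' with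
          | nil => simp [repDD]
          | cons x t'' =>
            by_cases hx : x = '-'
            · subst hx
              rw [show repDD ('-' :: '-' :: t'') = '-' :: repDD t'' by simp [repDD]]
              rw [squeeze_dd, squeeze_dd, squeeze_dd]
              exact (ih t'' (by simp at hlen; omega)).2
            · rw [show repDD ('-' :: x :: t'') = '-' :: repDD (x :: t'') by
                  simp [repDD]; intro h1; exact absurd h1 hx]
              rw [squeeze_dd, squeeze_dd]
              exact (ih (x :: t'') (by simp at hlen ⊢; omega)).2
        · rw [show repDD (c :: t') = c :: repDD t' by
              cases t' with
              | nil => simp [repDD]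
              | cons y r => simp [repDD]; intro h1 h2; exact absurd h1 hc]
          rw [squeeze_dash_cons_ne c _ hc, squeeze_dash_cons_ne c _ hc,
              squeeze_cons_ne c _ hc, squeeze_cons_ne c _ hc]
          have := (ih t' (by simp at hlen; omega)).1
          rw [this]

theorem squeeze_repDD (s : List Char) : squeeze (repDD s) = squeeze s :=
  (sq_rep_aux s.length s le_rfl).1

theorem replace_dd' (s : List Char) : PySem.Chars.replace s ['-', '-'] ['-'] = repDD s := by
  rw [show PySem.Chars.replace s ['-','-'] ['-'] = PySem.Chars.replace.go ['-','-'] ['-'] s.length s [] by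
    simp [PySem.Chars.replace]]
  rw [replace_dd s.length s [] le_rfl]
  simp

theorem replace_single' (a b : Char) (s : List Char) :
    PySem.Chars.replace s [a] [b] = s.map (fun c => if c = a then b else c) := by
  rw [show PySem.Chars.replace s [a] [b] = PySem.Chars.replace.go [a] [b] s.length s [] by
    simp [PySem.Chars.replace]]
  rw [replace_single a b s.length s [] le_rfl]
  simp

theorem genA_collapse_eq : ∀ (fuel : Nat) (s : List Char), s.length ≤ fuel →
    genA_collapse fuel s = squeeze s := by
  intro fuel
  induction fuel with
  | zero => intro s h; simp at h; simp [h, genA_collapse, squeeze]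
  | succ n ih =>
    intro s h
    simp only [genA_collapse]
    cases hdd : hasDD s with
    | false =>
      rw [hasDD_eq_isIn, hdd]
      simp [squeeze_self s hdd]
    | true =>
      rw [hasDD_eq_isIn, hdd]
      simp only [if_pos]
      rw [replace_dd' s]
      rw [ih (repDD s) (by have := repDD_length_lt s hdd; omega)]
      exact squeeze_repDD s

def fmChar (c : Char) : Option Char :=
  if PySem.Chars.isalnum c then some c
  else if c = ' ' ∨ c = '_' ∨ c = '-' then some '-'
  else none

theorem join_nil_flatten : ∀ (parts : List (List Char)), PySem.Chars.join [] parts = parts.flatten := by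
  intro parts
  induction parts with
  | nil => simp [PySem.Chars.join_nil]
  | cons a rest ih =>
    cases rest with
    | nil => simp [PySem.Chars.join_singleton]
    | cons b r =>
      rw [PySem.Chars.join_cons_cons]
      simp only [List.flatten_cons] at *
      rw [ih]
      simp

theorem fm_eq (cs : List Char) :
    PySem.Chars.join []
      ((PySem.Chars.replace (PySem.Chars.replace cs [' '] ['-']) ['_'] ['-']).map
        fun c => if (PySem.Chars.isalnum c || (c == '-')) = true then [c] else []) =
    cs.filterMap fmChar := by
  rw [replace_single', replace_single', join_nil_flatten]
  induction cs with
  | nil => simp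
  | cons c t ih =>
    simp only [List.map_cons, List.flatten_cons, List.filterMap_cons]
    rw [ih]
    have hsp : PySem.Chars.isalnum ' ' = false := by decide
    have hun : PySem.Chars.isalnum '_' = false := by decide
    have hda : PySem.Chars.isalnum '-' = false := by decide
    by_cases h1 : c = ' '
    · subst h1; simp [fmChar, hsp, hda]
    · by_cases h2 : c = '_'
      · subst h2; simp [fmChar, hun, hda]
      · by_cases h3 : c = '-'
        · subst h3; simp [fmChar, hda]
        · by_cases h4 : PySem.Chars.isalnum c
          · simp [fmChar, h1, h2, h3, h4]
          · simp [fmChar, h1, h2, h3, h4]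

def scanD : List Char → List Char → Bool → List Char
  | [], out, _ => out
  | c :: t, out, need =>
    if c = '-' then scanD t out true
    else scanD t ((if need && !out.isEmpty then out ++ ['-'] else out) ++ [c]) false

def gfun : Bool → List Char → List Char
  | _, [] => []
  | b, c :: t => if c = '-' then gfun true t else (if b then ['-'] else []) ++ c :: gfun false t

def pdash (c : Char) : Bool := List.contains ['-'] c

def rstripD (xs : List Char) : List Char := (List.dropWhile pdash xs.reverse).reverse

theorem scan_eq_scanD : ∀ (cs out : List Char) (need : Bool),
    genB_scan cs out need = scanD (cs.filterMap fmChar) out need := by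
  intro cs
  induction cs with
  | nil => intro out need; simp [genB_scan, scanD]
  | cons c t ih =>
    intro out need
    simp only [List.filterMap_cons]
    by_cases h4 : PySem.Chars.isalnum c
    · have hcd : c ≠ '-' := by intro h; subst h; exact absurd h4 (by decide)
      rw [show fmChar c = some c by simp [fmChar, h4]]
      simp only [genB_scan, scanD, if_pos h4, if_neg hcd]
      exact ih _ _
    · have h4' : PySem.Chars.isalnum c = false := by simpa using h4
      by_cases hsep : c = ' ' ∨ c = '_' ∨ c = '-'
      · rw [show fmChar c = some '-' by simp [fmChar, h4', hsep]]
        have hmem : ([' ', '_', '-'] : List Char).contains c = true := by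
          rcases hsep with h | h | h <;> simp [h]
        simp only [genB_scan, scanD, h4', hmem, Bool.false_eq_true, if_false, if_true]
        exact ih _ _
      · rw [show fmChar c = none by simp [fmChar, h4', hsep]]
        have hmem : ([' ', '_', '-'] : List Char).contains c = false := by
          simp only [List.contains_cons]
          simp only [not_or] at hsep
          simp [hsep.1, hsep.2.1, hsep.2.2]
        simp only [genB_scan, h4', hmem, Bool.false_eq_true, if_false]
        exact ih _ _

theorem scanD_out : ∀ (l out : List Char) (b : Bool), out ≠ [] →
    scanD l out b = out ++ gfun b l := by
  intro l
  induction l with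
  | nil => intro out b h; simp [scanD, gfun]
  | cons c t ih =>
    intro out b h
    by_cases hc : c = '-'
    · subst hc
      simp only [scanD, gfun, if_pos rfl]
      exact ih out true h
    · simp only [scanD, gfun, if_neg hc]
      have hne : (if b && !out.isEmpty then out ++ ['-'] else out) ++ [c] ≠ [] := by simp
      rw [ih _ false hne]
      have hbe : (!out.isEmpty) = true := by simpa using h
      cases b <;> simp [hbe]

theorem scanD_nil_flag (l : List Char) (b : Bool) : scanD l [] b = scanD l [] false := by
  cases l with
  | nil => rfl
  | cons c t =>
    by_cases hc : c = '-'
    · subst hc; simp [scanD]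
    · simp [scanD, if_neg hc]

theorem rstripD_cons (c : Char) (xs : List Char) :
    rstripD (c :: xs) = if rstripD xs = [] then (if c = '-' then [] else [c]) else c :: rstripD xs := by
  unfold rstripD
  rw [List.reverse_cons, List.dropWhile_append]
  by_cases he : (List.dropWhile pdash xs.reverse).isEmpty
  · rw [if_pos he]
    have : (List.dropWhile pdash xs.reverse).reverse = [] := by
      simp [List.isEmpty_iff.mp he]
    rw [if_pos this]
    by_cases hc : c = '-'
    · subst hc; simp [List.dropWhile, pdash]
    · simp [List.dropWhile, pdash, hc]
  · rw [if_neg he]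
    have : ¬ (List.dropWhile pdash xs.reverse).reverse = [] := by
      simpa [List.isEmpty_iff] using he
    rw [if_neg this]
    simp

theorem rstripD_cons_ne (c : Char) (xs : List Char) (h : c ≠ '-') :
    rstripD (c :: xs) = c :: rstripD xs := by
  rw [rstripD_cons]
  by_cases he : rstripD xs = [] <;> simp [he, h]

theorem rstripD_dash (xs : List Char) :
    rstripD ('-' :: xs) = if rstripD xs = [] then [] else '-' :: rstripD xs := by
  rw [rstripD_cons]; simp

theorem gfun_eq : ∀ (l : List Char) (b : Bool),
    gfun b l = rstripD (squeeze (if b then '-' :: l else l)) := by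
  intro l
  induction l with
  | nil =>
    intro b
    cases b <;> decide
  | cons c t ih =>
    intro b
    by_cases hc : c = '-'
    · subst hc
      have key : gfun b ('-' :: t) = gfun true t := by simp [gfun]
      rw [key, ih true]
      cases b
      · simp
      · simp only [if_true]
        rw [squeeze_dd]
    · have key : gfun b (c :: t) = (if b then ['-'] else []) ++ c :: gfun false t := by
        simp [gfun, hc]
      rw [key, ih false]
      cases b
      · simp only [Bool.false_eq_true, if_false, List.nil_append]
        rw [squeeze_cons_ne c t hc, rstripD_cons_ne c _ hc]
      · simp only [if_true, List.singleton_append]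
        rw [squeeze_dash_cons_ne c t hc, squeeze_cons_ne c t hc]
        rw [rstripD_dash, rstripD_cons_ne c _ hc]
        simp

theorem pdash_eq : pdash = fun c => decide (c = '-') := by
  funext c; simp [pdash]

theorem stripD_eq (xs : List Char) :
    PySem.Chars.stripChars xs ['-'] = rstripD (List.dropWhile pdash xs) := by
  simp [PySem.Chars.stripChars, rstripD, pdash_eq]

theorem scanD_main : ∀ (l : List Char), scanD l [] false = PySem.Chars.stripChars (squeeze l) ['-'] := by
  intro l
  induction l with
  | nil => simp [scanD, squeeze, PySem.Chars.stripChars]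
  | cons c t ih =>
    by_cases hc : c = '-'
    · subst hc
      have l1 : scanD ('-' :: t) [] false = scanD t [] false := by
        simp only [scanD, if_pos rfl]
        exact scanD_nil_flag t true
      rw [l1, ih]
      -- stripD (squeeze ('-'::t)) = stripD (squeeze t)
      cases t with
      | nil => simp [squeeze, PySem.Chars.stripChars, pdash, List.dropWhile]
      | cons d t' =>
        by_cases hd : d = '-'
        · subst hd; rw [squeeze_dd]
        · rw [squeeze_dash_cons_ne d t' hd, squeeze_cons_ne d t' hd]
          rw [stripD_eq, stripD_eq]
          have : List.dropWhile pdash ('-' :: d :: squeeze t') = List.dropWhile pdash (d :: squeeze t') := by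
            simp [List.dropWhile, pdash]
          rw [this]
    · have l1 : scanD (c :: t) [] false = [c] ++ gfun false t := by
        simp only [scanD, if_neg hc]
        exact scanD_out t [c] false (by simp)
      rw [l1, gfun_eq t false]
      simp only [Bool.false_eq_true, if_false]
      rw [squeeze_cons_ne c t hc, stripD_eq]
      have hdw : List.dropWhile pdash (c :: squeeze t) = c :: squeeze t := by
        rw [pdash_eq]
        simp [List.dropWhile, hc]
      rw [hdw, rstripD_cons_ne c _ hc]
      simp

theorem title_branch_eq (cs : List Char) :
    let semantic2 := PySem.Chars.join []
      ((PySem.Chars.replace (PySem.Chars.replace cs [' '] ['-']) ['_'] ['-']).map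
        fun c => if (PySem.Chars.isalnum c || (c == '-')) = true then [c] else [])
    PySem.Chars.stripChars (genA_collapse semantic2.length semantic2) ['-'] = genB_scan cs [] false := by
  simp only
  rw [fm_eq, genA_collapse_eq _ _ le_rfl, ← scanD_main, scan_eq_scanD]

theorem rest_eq (old_id title : String) : genA_rest old_id title = genB_rest old_id title := by
  unfold genA_rest genB_rest
  by_cases h : (!title.toList.isEmpty) = true
  · rw [if_pos h, if_pos h]
    exact congrArg String.ofList (title_branch_eq (PySem.Chars.lower title.toList))
  · rw [if_neg h, if_neg h]

-- ===== VERDICT (by name: the statement is the Claim_ definition above) =====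
theorem generate_semantic_id_py_spec : Claim_equal_generate_semantic_id_py := by
  intro old_id title _
  unfold Spec_generate_semantic_id_py generate_semantic_id_py generate_semantic_id_py_alt
  simp only [rest_eq]
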